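-- pv_equiv track=rewrite | github.com/sreevardhanreddi/docker-inspector | server/api/docker/utils/data_utils.py | _get_port_mapping
-- ===== SOURCE A (Python) =====
-- def _get_port_mapping(port_mapping={}):
--     formatted_port_maps = {}
--     for port in port_mapping:
--         formatted_port_maps[port] = None
--         if port_mapping[port]:
--             formatted_port_maps[port] = [
--                 ":".join(address.values()) for address in port_mapping[port]
--             ]
--
--     mapping_list = []
--     for mapping in formatted_port_maps:
--         formatted_port_mapping_string = ""
--         if not formatted_port_maps[mapping]:
--             mapping_list.append(mapping)
--         if formatted_port_maps[mapping]:
--             formatted_port_mapping_string = (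
--                 formatted_port_maps[mapping][0] + "->" + mapping
--             )
--             mapping_list.append(formatted_port_mapping_string)
--
--     return ", ".join(mapping_list)
-- ===== SOURCE B (Python) =====
-- def _format_entry(port, addresses):
--     if addresses:
--         return ":".join(addresses[0].values()) + "->" + port
--     return port
--
--
-- def _get_port_mapping(port_mapping={}):
--     return ", ".join(_format_entry(port, addresses) for port, addresses in port_mapping.items())
-- ===== Notes on version B (the rewrite author's own statement) =====
-- stated objective: simpler
-- what changed: One pass over port_mapping.items() formatting each entry directly (joining only the first address, which is the only one A's output uses) replaces A's two-phase design that first builds an intermediate dict of fully joined address lists and then loops over it; Pre_ excludes association lists with duplicate keys (outer or inside an address dict), which cannot arise from a Python dict argument.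
import Mathlib
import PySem

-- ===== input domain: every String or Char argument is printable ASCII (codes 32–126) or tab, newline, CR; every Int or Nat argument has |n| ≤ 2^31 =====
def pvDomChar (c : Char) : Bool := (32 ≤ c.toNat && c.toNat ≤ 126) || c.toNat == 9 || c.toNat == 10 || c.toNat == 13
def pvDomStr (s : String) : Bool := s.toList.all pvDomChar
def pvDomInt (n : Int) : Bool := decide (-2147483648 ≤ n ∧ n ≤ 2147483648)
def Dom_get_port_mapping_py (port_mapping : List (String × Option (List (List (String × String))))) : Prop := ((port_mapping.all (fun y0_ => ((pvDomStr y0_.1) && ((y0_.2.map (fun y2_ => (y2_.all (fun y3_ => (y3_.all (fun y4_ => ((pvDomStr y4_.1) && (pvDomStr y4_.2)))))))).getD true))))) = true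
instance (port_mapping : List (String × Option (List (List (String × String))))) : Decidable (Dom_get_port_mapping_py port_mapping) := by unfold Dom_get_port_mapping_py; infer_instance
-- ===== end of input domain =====

-- B replaces A's two-phase design (intermediate dict of fully joined address lists, then a second loop)
-- with a single pass formatting each entry directly (joining only the first address); return value only, simpler.

-- ===== PORT A =====
-- ":".join(address.values())
def pvJoinAddr (a : List (String × String)) : String :=
  PySem.Str.join ":" ((PySem.Dict.mk a).values)

-- first loop body: formatted_port_maps[port] = None; if port_mapping[port]: formatted_port_maps[port] = [...]
-- (port_mapping[port] is the iterated value: dict keys are unique under Pre_)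
def pvStepA (fm : PySem.Dict String (Option (List String)))
    (kv : String × Option (List (List (String × String)))) : PySem.Dict String (Option (List String)) :=
  let fm := fm.insert kv.1 none
  match kv.2 with
  | none => fm
  | some addrs => if addrs.isEmpty then fm else fm.insert kv.1 (some (addrs.map pvJoinAddr))

-- second loop body: if not v: append key; if v: append v[0] + "->" + key
def pvStepA2 (acc : List String) (kv : String × Option (List String)) : List String :=
  match kv.2 with
  | none => acc ++ [kv.1]
  | some [] => acc ++ [kv.1]
  | some (s :: _) => acc ++ [s ++ "->" ++ kv.1]

def get_port_mapping_py (port_mapping : List (String × Option (List (List (String × String))))) : String :=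
  PySem.Str.join ", " ((port_mapping.foldl pvStepA PySem.Dict.empty).items.foldl pvStepA2 ([] : List String))

-- ===== PORT B =====
def pvFmtEntry (port : String) (addresses : Option (List (List (String × String)))) : String :=
  match addresses with
  | some (a :: _) => PySem.Str.join ":" ((PySem.Dict.mk a).values) ++ "->" ++ port
  | _ => port

def get_port_mapping_py_alt (port_mapping : List (String × Option (List (List (String × String))))) : String :=
  PySem.Str.join ", " (port_mapping.map (fun kv => pvFmtEntry kv.1 kv.2))

-- ===== PRECONDITION & SPEC =====
-- Pre_ excludes association lists with duplicate keys (in the outer mapping or inside an address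
-- dict): a Python dict argument cannot contain duplicates, so those lists represent no input A sees.
def Pre_get_port_mapping_py (port_mapping : List (String × Option (List (List (String × String))))) : Prop :=
  (port_mapping.map Prod.fst).Nodup ∧
  ∀ e ∈ port_mapping, ∀ addrs, e.2 = some addrs → ∀ a ∈ addrs, (a.map Prod.fst).Nodup
instance (port_mapping : List (String × Option (List (List (String × String))))) : Decidable (Pre_get_port_mapping_py port_mapping) := by unfold Pre_get_port_mapping_py; infer_instance

def pvWitness_get_port_mapping_py : (List (String × Option (List (List (String × String))))) :=
  [("80/tcp", some [[("HostIp", "0.0.0.0"), ("HostPort", "8080")]]), ("5432/tcp", none)]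

def Spec_get_port_mapping_py (port_mapping : List (String × Option (List (List (String × String))))) (out : String) : Prop := out = get_port_mapping_py_alt port_mapping
instance (port_mapping : List (String × Option (List (List (String × String))))) (out : String) : Decidable (Spec_get_port_mapping_py port_mapping out) := by unfold Spec_get_port_mapping_py; infer_instance

-- ===== CLAIM (what is proved, stated in full; the proofs are below) =====
def Claim_equal_get_port_mapping_py : Prop := ∀ (port_mapping : List (String × Option (List (List (String × String))))), Dom_get_port_mapping_py port_mapping → Pre_get_port_mapping_py port_mapping → Spec_get_port_mapping_py port_mapping (get_port_mapping_py port_mapping)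

-- ===== LEMMAS AND PROOFS =====

-- the value A's first loop stores for one entry
def pvFmtVal (v : Option (List (List (String × String)))) : Option (List String) :=
  match v with
  | none => none
  | some [] => none
  | some addrs => some (addrs.map pvJoinAddr)

lemma pvStepA_items (fm : PySem.Dict String (Option (List String)))
    (kv : String × Option (List (List (String × String))))
    (h : ∀ p ∈ fm.items, p.1 ≠ kv.1) :
    (pvStepA fm kv).items = fm.items ++ [(kv.1, pvFmtVal kv.2)] := by
  have hc : fm.contains kv.1 = false := by
    simp only [PySem.Dict.contains, List.any_eq_false]
    intro p hp
    simpa using h p hp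
  have h1 : (fm.insert kv.1 none).items = fm.items ++ [(kv.1, (none : Option (List String)))] := by
    simp [PySem.Dict.insert, hc]
  have hc2 : (fm.insert kv.1 none).contains kv.1 = true := by
    simp [PySem.Dict.contains, h1]
  have h2 : ∀ w : List String,
      ((fm.insert kv.1 none).insert kv.1 (some w)).items = fm.items ++ [(kv.1, some w)] := by
    intro w
    have hu : ∀ (d : PySem.Dict String (Option (List String))), d.contains kv.1 = true →
        (d.insert kv.1 (some w)).items =
          d.items.map (fun p => if (p.1 == kv.1) = true then (kv.1, some w) else p) := by
      intro d hcd
      simp [PySem.Dict.insert, hcd]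
    rw [hu _ hc2, h1, List.map_append, List.map_cons, List.map_nil]
    simp only [beq_self_eq_true, if_true]
    congr 1
    calc fm.items.map (fun p => if (p.1 == kv.1) = true then (kv.1, some w) else p)
        = fm.items.map id := List.map_congr_left (fun p hp => by simp [h p hp])
      _ = fm.items := List.map_id _
  rcases kv with ⟨k, v⟩
  match v with
  | none => simpa [pvStepA, pvFmtVal] using h1
  | some [] => simpa [pvStepA, pvFmtVal] using h1
  | some (a :: t) => simpa [pvStepA, pvFmtVal] using h2 ((a :: t).map pvJoinAddr)

lemma pvFoldA_items (pm : List (String × Option (List (List (String × String)))))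
    (fm : PySem.Dict String (Option (List String)))
    (hd : ∀ k ∈ pm.map Prod.fst, ∀ p ∈ fm.items, p.1 ≠ k)
    (hn : (pm.map Prod.fst).Nodup) :
    (pm.foldl pvStepA fm).items = fm.items ++ pm.map (fun kv => (kv.1, pvFmtVal kv.2)) := by
  induction pm generalizing fm with
  | nil => simp
  | cons kv rest ih =>
    simp only [List.foldl_cons, List.map_cons]
    have hfresh : ∀ p ∈ fm.items, p.1 ≠ kv.1 := by
      intro p hp
      exact hd kv.1 (by simp) p hp
    rw [ih (pvStepA fm kv) ?_ ?_, pvStepA_items fm kv hfresh]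
    · simp
    · intro k hk p hp
      rw [pvStepA_items fm kv hfresh] at hp
      rcases List.mem_append.1 hp with h1 | h1
      · exact hd k (by simp [hk]) p h1
      · simp only [List.mem_singleton] at h1
        subst h1
        simp only [List.map_cons, List.nodup_cons] at hn
        intro he
        exact hn.1 (he ▸ hk)
    · simpa using hn.of_cons

lemma pvFoldA2_eq (l : List (String × Option (List String))) (acc : List String) :
    l.foldl pvStepA2 acc = acc ++ l.map (fun kv =>
      match kv.2 with
      | none => kv.1
      | some [] => kv.1
      | some (s :: _) => s ++ "->" ++ kv.1) := by
  induction l generalizing acc with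
  | nil => simp
  | cons kv rest ih =>
    simp only [List.foldl_cons, List.map_cons, ih]
    rcases kv with ⟨k, v⟩
    match v with
    | none => simp [pvStepA2]
    | some [] => simp [pvStepA2]
    | some (s :: t) => simp [pvStepA2]

-- ===== VERDICT (by name: the statement is the Claim_ definition above) =====
theorem get_port_mapping_py_spec : Claim_equal_get_port_mapping_py := by
  intro pm _ hpre
  show _ = _
  unfold get_port_mapping_py get_port_mapping_py_alt
  rw [pvFoldA_items pm PySem.Dict.empty (by intro k _ p hp; cases hp) hpre.1]
  rw [show (PySem.Dict.empty : PySem.Dict String (Option (List String))).items = [] from rfl,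
    List.nil_append, pvFoldA2_eq, List.nil_append, List.map_map]
  congr 1
  apply List.map_congr_left
  intro kv _
  rcases kv with ⟨k, v⟩
  match v with
  | none => rfl
  | some [] => rfl
  | some (a :: t) => rfl
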